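-- pv_equiv track=rewrite | github.com/woobottle/TIL | Algorithm/Zerobase/Final/q4.py | solution
-- ===== SOURCE A (Python) =====
-- def solution(N, duration, cost):
--   dp = [0]*(N+1)
--
--   def dynamic_programming():
--     max_val = 0
--     for i in range(N-1, -1, -1):
--       if i + duration[i] <= N :
--         dp[i] = max(dp[i+1], dp[i + duration[i]] + cost[i])
--     max_val = max(dp)
--     return max_val
--
--   result = dynamic_programming()
--   return result
-- ===== SOURCE B (Python) =====
-- def solution(N, duration, cost):
--     # top-down memoized recursion over the same recurrence:
--     # f(i) = 0 if i + duration[i] > N else max(f(i+1), f(i+duration[i]) + cost[i]),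
--     # with f(N) = 0 preset; the answer is the best f(i) over all start points.
--     memo = {N: 0}
--
--     def f(i):
--         if i in memo:
--             return memo[i]
--         if i + duration[i] > N:
--             v = 0
--         else:
--             v = max(f(i + 1), f(i + duration[i]) + cost[i])
--         memo[i] = v
--         return v
--
--     best = 0
--     for i in range(N, -1, -1):
--         best = max(best, f(i))
--     return best
-- ===== Notes on version B (the rewrite author's own statement) =====
-- stated objective: alternative
-- what changed: Replaces the bottom-up preallocated dp array with in-place index writes plus a final max() scan by a top-down memoized recursive function f(i) over a dict (f(N)=0 preset), driving it from each start point and folding the running best into the same loop.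
-- outside the precondition, e.g. on solution(2, [0, 1], [5, 5]): A returns 5, B raises RecursionError; on solution(1, [-1], [3]): A returns 3, B raises RecursionError
import Mathlib
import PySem

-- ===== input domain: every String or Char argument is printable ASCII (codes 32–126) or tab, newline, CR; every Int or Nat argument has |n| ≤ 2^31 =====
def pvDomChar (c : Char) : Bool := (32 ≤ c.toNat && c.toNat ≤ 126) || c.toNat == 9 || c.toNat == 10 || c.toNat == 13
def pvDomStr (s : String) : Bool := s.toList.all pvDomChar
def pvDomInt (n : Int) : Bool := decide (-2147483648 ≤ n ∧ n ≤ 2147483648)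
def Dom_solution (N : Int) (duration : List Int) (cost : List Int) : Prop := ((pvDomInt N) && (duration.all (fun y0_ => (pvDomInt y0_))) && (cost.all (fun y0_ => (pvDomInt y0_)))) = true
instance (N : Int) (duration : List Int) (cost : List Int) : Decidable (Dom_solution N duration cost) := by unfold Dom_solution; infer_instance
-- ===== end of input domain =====

-- B replaces A's bottom-up preallocated dp array (in-place index writes plus a final
-- max() scan) by a top-down memoized recursive function over a dict, folding the
-- running best into the driving loop (objective: alternative; same O(N) cost).

-- ===== PORT A =====
-- body of A's loop: 'if i + duration[i] <= N: dp[i] = max(dp[i+1], dp[i+duration[i]] + cost[i])'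
def solutionStepA (N : Int) (duration cost : List Int) (dp : List Int) (i : Int) : List Int :=
  let d := PySem.List.pyGetD duration i 0
  if i + d ≤ N then
    PySem.List.pySetD dp i
      (max (PySem.List.pyGetD dp (i + 1) 0)
           (PySem.List.pyGetD dp (i + d) 0 + PySem.List.pyGetD cost i 0))
  else dp

def solution (N : Int) (duration : List Int) (cost : List Int) : Int :=
  let dp := (PySem.List.pyRange (N - 1) (-1) (-1)).foldl (solutionStepA N duration cost)
              (List.replicate (N + 1).toNat (0 : Int))
  (PySem.List.max? dp (fun x => x)).getD 0   -- max(dp); empty dp (N < 0) is excluded by Pre_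

-- ===== PORT B =====
-- B's memoized recursive f: f(i) = memo[i] if present, 0 if i+duration[i] > N,
-- else max(f(i+1), f(i+duration[i]) + cost[i]); memo[i] is stored before returning.
-- The fuel argument only makes the recursion total in Lean; on Pre_ inputs the
-- fuel passed by solution_alt is never exhausted.
def solutionF (N : Int) (duration cost : List Int) : Nat → Int → PySem.Dict Int Int → Int × PySem.Dict Int Int
  | 0, _, memo => (0, memo)
  | fuel+1, i, memo =>
    match memo.get? i with
    | some v => (v, memo)
    | none =>
      let d := PySem.List.pyGetD duration i 0
      if N < i + d then (0, memo.insert i 0)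
      else
        let r1 := solutionF N duration cost fuel (i + 1) memo
        let r2 := solutionF N duration cost fuel (i + d) r1.2
        let v := max r1.1 (r2.1 + PySem.List.pyGetD cost i 0)
        (v, r2.2.insert i v)

def solution_alt (N : Int) (duration : List Int) (cost : List Int) : Int :=
  let memo0 := (PySem.Dict.empty : PySem.Dict Int Int).insert N 0   -- memo = {N: 0}
  let st := (PySem.List.pyRange N (-1) (-1)).foldl
      (fun (st : PySem.Dict Int Int × Int) i =>
        let r := solutionF N duration cost (N + 2).toNat i st.1
        (r.2, max st.2 r.1)) (memo0, 0)
  st.2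

-- ===== PRECONDITION & SPEC =====
-- Pre_ restricts to the natural scheduling domain: N ≥ 0 (A raises ValueError on max([])
-- for negative N), both lists at least N long (else A raises IndexError), and positive
-- durations: on zero or negative durations A returns a value only via Python's
-- negative-index wraparound, where B's own recursion raises RecursionError.
def Pre_solution (N : Int) (duration : List Int) (cost : List Int) : Prop :=
  0 ≤ N ∧ N ≤ (duration.length : Int) ∧ N ≤ (cost.length : Int) ∧
    (duration.take N.toNat).all (fun d => decide (1 ≤ d)) = true
instance (N : Int) (duration : List Int) (cost : List Int) : Decidable (Pre_solution N duration cost) := by unfold Pre_solution; infer_instance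

def pvWitness_solution : Int × List Int × List Int := (2, [1, 2], [3, 4])

def Spec_solution (N : Int) (duration : List Int) (cost : List Int) (out : Int) : Prop := out = solution_alt N duration cost
instance (N : Int) (duration : List Int) (cost : List Int) (out : Int) : Decidable (Spec_solution N duration cost out) := by unfold Spec_solution; infer_instance

-- ===== CLAIM (what is proved, stated in full; the proofs are below) =====
def Claim_equal_solution : Prop := ∀ (N : Int) (duration : List Int) (cost : List Int), Dom_solution N duration cost → Pre_solution N duration cost → Spec_solution N duration cost (solution N duration cost)

-- ===== LEMMAS AND PROOFS =====

-- partial fold of A's loop, with the fold list rewritten to List.range m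
def Afold (duration cost : List Int) (n m : Nat) : List Int :=
  (List.range m).foldl
    (fun dp (k : Nat) => solutionStepA (n : Int) duration cost dp ((n : Int) - 1 - (k : Int)))
    (List.replicate (n + 1) (0 : Int))

-- the dp table as a list built head-first: Dlist n m = [dp[n-m], …, dp[n]]
def Dlist (duration cost : List Int) (n : Nat) : Nat → List Int
  | 0 => [0]
  | m+1 =>
    let rest := Dlist duration cost n m
    let i := n - (m+1)
    let d := duration.getD i 0
    (if (i : Int) + d ≤ (n : Int) then
        max (rest.getD 0 0) (rest.getD (d - 1).toNat 0 + cost.getD i 0)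
      else 0) :: rest

lemma Dlist_length (duration cost : List Int) (n : Nat) :
    ∀ m, (Dlist duration cost n m).length = m + 1 := by
  intro m
  induction m with
  | zero => rfl
  | succ m ih => simp [Dlist, ih]

lemma Dlist_mem_zero (duration cost : List Int) (n : Nat) :
    ∀ m, (0 : Int) ∈ Dlist duration cost n m := by
  intro m
  induction m with
  | zero => simp [Dlist]
  | succ m ih => simp only [Dlist]; exact List.mem_cons_of_mem _ ih

lemma foldl_max_max (l : List Int) : ∀ a b : Int, l.foldl max (max a b) = max a (l.foldl max b) := by
  induction l with
  | nil => intro a b; simp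
  | cons x t ih => intro a b; rw [List.foldl_cons, List.foldl_cons, max_assoc]; exact ih a (max b x)

lemma foldl_max_absorb (t : List Int) : ∀ a c : Int, c ∈ t → t.foldl max (max a c) = t.foldl max a := by
  induction t with
  | nil => intro a c h; cases h
  | cons y t' ih =>
    intro a c h
    rcases List.mem_cons.mp h with h | h
    · subst h; simp only [List.foldl_cons]
      have : max (max a c) c = max a c := by rw [max_assoc, max_self]
      rw [this]
    · simp only [List.foldl_cons]
      have h1 : max (max a c) y = max (max a y) c := by
        rw [max_right_comm]
      rw [h1, ih _ _ h]

lemma foldl_max_reverse (l : List Int) : ∀ a : Int, l.reverse.foldl max a = l.foldl max a := by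
  induction l with
  | nil => intro a; simp
  | cons x t ih =>
    intro a
    simp only [List.reverse_cons, List.foldl_append, List.foldl_cons, List.foldl_nil, ih]
    have h1 : t.foldl max (max a x) = max x (t.foldl max a) := by
      rw [max_comm a x]; exact foldl_max_max t x a
    rw [h1, max_comm]

lemma maxD_eq_foldl (l : List Int) (hne : l ≠ []) (h0 : (0 : Int) ∈ l) :
    (PySem.List.max? l (fun y => y)).getD 0 = l.foldl max 0 := by
  obtain ⟨x, t, rfl⟩ := List.exists_cons_of_ne_nil hne
  rw [PySem.List.max?_id_cons, Option.getD_some, List.foldl_cons]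
  rcases List.mem_cons.mp h0 with h | h
  · rw [← h]; simp
  · rw [max_comm, foldl_max_absorb t x 0 h]

-- A's fold equals the padded Dlist table
lemma inv_A (duration cost : List Int) (n : Nat)
    (hpos : ∀ j, j < n → 1 ≤ duration.getD j 0) :
    ∀ m, m ≤ n →
      Afold duration cost n m = List.replicate (n - m) (0 : Int) ++ Dlist duration cost n m := by
  intro m
  induction m with
  | zero =>
    intro _
    simp only [Afold, List.range_zero, List.foldl_nil, Dlist, Nat.sub_zero]
    rw [List.replicate_succ']
  | succ m ih =>
    intro hm1
    have hm : m < n := by omega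
    have hA := ih (le_of_lt hm)
    have hstep : Afold duration cost n (m+1)
        = solutionStepA (n : Int) duration cost (Afold duration cost n m) ((n : Int) - 1 - (m : Int)) := by
      simp [Afold, List.range_succ]
    have hi : (n : Int) - 1 - (m : Int) = ((n - 1 - m : Nat) : Int) := by omega
    have hIdx : n - (m + 1) = n - 1 - m := by omega
    have hdget : PySem.List.pyGetD duration ((n : Int) - 1 - (m : Int)) 0 = duration.getD (n - 1 - m) 0 := by
      rw [hi]; simp
    set d := duration.getD (n - 1 - m) 0 with hddef
    have hdpos : 1 ≤ d := hpos _ (by omega)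
    set DL := Dlist duration cost n m with hDL
    have hlen : DL.length = m + 1 := Dlist_length duration cost n m
    have hDstep : Dlist duration cost n (m+1)
        = (if ((n - 1 - m : Nat) : Int) + d ≤ (n : Int) then
            max (DL.getD 0 0) (DL.getD (d - 1).toNat 0 + cost.getD (n - 1 - m) 0)
          else 0) :: DL := by
      simp only [Dlist, hIdx, ← hddef, ← hDL]
    rw [hstep, hA, hDstep]
    simp only [solutionStepA]
    rw [hdget]
    by_cases hcond : (n : Int) - 1 - (m : Int) + d ≤ (n : Int)
    · have hcondN : ((n - 1 - m : Nat) : Int) + d ≤ (n : Int) := by rw [← hi]; exact hcond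
      rw [if_pos hcond, if_pos hcondN]
      have hdn : (d - 1).toNat ≤ m := by omega
      -- dp[i+1] = head of DL
      have hx1 : PySem.List.pyGetD (List.replicate (n - m) (0:Int) ++ DL) ((n : Int) - 1 - (m : Int) + 1) 0
          = DL.getD 0 0 := by
        rw [show (n : Int) - 1 - (m : Int) + 1 = ((n - m : Nat) : Int) by omega,
            PySem.List.pyGetD_natCast]
        rw [List.getD_append_right _ _ _ _ (by simp)]
        simp
      -- dp[i+d] = DL[d-1]
      have hx2 : PySem.List.pyGetD (List.replicate (n - m) (0:Int) ++ DL) ((n : Int) - 1 - (m : Int) + d) 0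
          = DL.getD (d - 1).toNat 0 := by
        rw [show (n : Int) - 1 - (m : Int) + d = ((n - m + (d - 1).toNat : Nat) : Int) by omega,
            PySem.List.pyGetD_natCast]
        rw [List.getD_append_right _ _ _ _ (by simp)]
        simp only [List.length_replicate]
        rw [show n - m + (d - 1).toNat - (n - m) = (d - 1).toNat by omega]
      have hx3 : PySem.List.pyGetD cost ((n : Int) - 1 - (m : Int)) 0 = cost.getD (n - 1 - m) 0 := by
        rw [hi]; simp
      rw [hx1, hx2, hx3]
      set w := max (DL.getD 0 0) (DL.getD (d - 1).toNat 0 + cost.getD (n - 1 - m) 0) with hw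
      rw [hi, PySem.List.pySetD_natCast, List.set_append]
      rw [if_pos (by simp only [List.length_replicate]; omega)]
      rw [show n - m = (n - m - 1) + 1 by omega, List.replicate_succ',
          List.set_append, if_neg (by simp only [List.length_replicate]; omega)]
      simp only [List.length_replicate]
      rw [show n - 1 - m - (n - m - 1) = 0 by omega]
      simp only [List.set_cons_zero]
      rw [show n - (m + 1) = n - m - 1 by omega]
      simp
    · have hcondN : ¬ ((n - 1 - m : Nat) : Int) + d ≤ (n : Int) := by rw [← hi]; exact hcond
      rw [if_neg hcond, if_neg hcondN]
      rw [show n - m = (n - m - 1) + 1 by omega, List.replicate_succ',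
          show n - (m + 1) = n - m - 1 by omega]
      simp

lemma getD_drop (l : List Int) (a t : Nat) : (l.drop a).getD t 0 = l.getD (a + t) 0 := by
  simp [List.getD_eq_getElem?_getD, List.getElem?_drop]

lemma Dlist_drop (duration cost : List Int) (n : Nat) :
    ∀ j, j ≤ n → Dlist duration cost n (n - j) = (Dlist duration cost n n).drop j := by
  intro j
  induction j with
  | zero => intro _; simp
  | succ j ih =>
    intro hj
    have h1 := ih (by omega)
    have h2 : n - j = (n - (j+1)) + 1 := by omega
    rw [h2] at h1
    have h3 : Dlist duration cost n (n - (j+1)) = (Dlist duration cost n ((n - (j+1)) + 1)).tail := by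
      simp [Dlist]
    rw [h3, h1, List.tail_drop]

-- the recurrence satisfied by the full table L = Dlist n n
lemma L_rec (duration cost : List Int) (n : Nat) (j : Nat) (hj : j < n) :
    (Dlist duration cost n n).getD j 0 =
      (if (j : Int) + duration.getD j 0 ≤ (n : Int) then
        max ((Dlist duration cost n n).getD (j + 1) 0)
            ((Dlist duration cost n n).getD (j + 1 + (duration.getD j 0 - 1).toNat) 0 + cost.getD j 0)
      else 0) := by
  have h1 := Dlist_drop duration cost n j (by omega)
  have h2 : n - j = (n - (j+1)) + 1 := by omega
  rw [h2] at h1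
  have h3 := Dlist_drop duration cost n (j+1) (by omega)
  have hIdx : n - ((n - (j+1)) + 1) = j := by omega
  have hstep : Dlist duration cost n ((n - (j+1)) + 1)
      = (if (j : Int) + duration.getD j 0 ≤ (n : Int) then
          max ((Dlist duration cost n (n - (j+1))).getD 0 0)
              ((Dlist duration cost n (n - (j+1))).getD (duration.getD j 0 - 1).toNat 0 + cost.getD j 0)
        else 0) :: Dlist duration cost n (n - (j+1)) := by
    simp only [Dlist, hIdx]
  rw [h3] at hstep
  have hhead : (Dlist duration cost n n).getD j 0
      = (Dlist duration cost n ((n - (j+1)) + 1)).getD 0 0 := by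
    rw [h1, getD_drop]; norm_num
  rw [hhead, hstep]
  simp only [List.getD_cons_zero]
  rw [getD_drop, getD_drop]

lemma L_last (duration cost : List Int) (n : Nat) :
    (Dlist duration cost n n).getD n 0 = 0 := by
  have h1 := Dlist_drop duration cost n n (le_refl n)
  simp only [Nat.sub_self] at h1
  have : (Dlist duration cost n n).getD n 0 = ((Dlist duration cost n n).drop n).getD 0 0 := by
    rw [getD_drop]; norm_num
  rw [this, ← h1]
  rfl

-- memo invariant: N is bound to 0 and every bound key is a table entry
def GoodMemo (duration cost : List Int) (n : Nat) (memo : PySem.Dict Int Int) : Prop :=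
  memo.get? (n : Int) = some 0 ∧
  ∀ j v, memo.get? j = some v →
    0 ≤ j ∧ j ≤ (n : Int) ∧ v = (Dlist duration cost n n).getD j.toNat 0

lemma f_correct (duration cost : List Int) (n : Nat)
    (hpos : ∀ j, j < n → 1 ≤ duration.getD j 0) :
    ∀ fuel (i : Int) memo, GoodMemo duration cost n memo → 0 ≤ i → i ≤ (n : Int) →
      n - i.toNat + 1 ≤ fuel →
      (solutionF (n : Int) duration cost fuel i memo).1 = (Dlist duration cost n n).getD i.toNat 0 ∧
      GoodMemo duration cost n (solutionF (n : Int) duration cost fuel i memo).2 := by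
  intro fuel
  induction fuel with
  | zero => intro i memo _ _ _ hf; omega
  | succ fuel ih =>
    intro i memo hgood h0 hn hf
    obtain ⟨hgN, hgAll⟩ := hgood
    by_cases hmem : ∃ v, memo.get? i = some v
    · obtain ⟨v, hv⟩ := hmem
      have := hgAll i v hv
      simp only [solutionF, hv]
      exact ⟨this.2.2.symm ▸ rfl, hgN, hgAll⟩
    · have hnone : memo.get? i = none := by
        cases h : memo.get? i with
        | none => rfl
        | some v => exact absurd ⟨v, h⟩ hmem
      have hine : i ≠ (n : Int) := by
        intro h; rw [h, hgN] at hnone; cases hnone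
      have hilt : i < (n : Int) := lt_of_le_of_ne hn hine
      have hiN : i = ((i.toNat : Nat) : Int) := (Int.toNat_of_nonneg h0).symm
      have hjlt : i.toNat < n := by omega
      have hdget : PySem.List.pyGetD duration i 0 = duration.getD i.toNat 0 := by
        conv_lhs => rw [hiN]
        rw [PySem.List.pyGetD_natCast]
      set d := duration.getD i.toNat 0 with hddef
      have hdpos : 1 ≤ d := hpos _ hjlt
      have hLrec := L_rec duration cost n i.toNat hjlt
      simp only [solutionF, hnone, hdget]
      by_cases hcond : (n : Int) < i + d
      · rw [if_pos hcond]
        have hval : (Dlist duration cost n n).getD i.toNat 0 = 0 := by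
          rw [hLrec, if_neg (by omega)]
        refine ⟨hval.symm, ?_, ?_⟩
        · show (memo.insert i 0).get? (n : Int) = some 0
          rw [PySem.Dict.get?_insert, if_neg (fun h => hine h.symm)]
          exact hgN
        · intro j v hjv
          replace hjv : (memo.insert i 0).get? j = some v := hjv
          rw [PySem.Dict.get?_insert] at hjv
          by_cases hji : j = i
          · rw [if_pos hji] at hjv
            refine ⟨hji ▸ h0, hji ▸ le_of_lt hilt, ?_⟩
            rw [hji, hval]
            exact (Option.some.injEq _ _).mp hjv.symm ▸ (by injection hjv; omega)
          · rw [if_neg hji] at hjv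
            exact hgAll j v hjv
      · rw [if_neg hcond]
        have hcond' : i + d ≤ (n : Int) := by omega
        -- first recursive call f(i+1)
        have h1 := ih (i + 1) memo ⟨hgN, hgAll⟩ (by omega) (by omega) (by omega)
        set r1 := solutionF (n : Int) duration cost fuel (i + 1) memo with hr1
        -- second recursive call f(i+d)
        have h2 := ih (i + d) r1.2 h1.2 (by omega) (by omega) (by omega)
        set r2 := solutionF (n : Int) duration cost fuel (i + d) r1.2 with hr2
        have hcget : PySem.List.pyGetD cost i 0 = cost.getD i.toNat 0 := by
          conv_lhs => rw [hiN]
          rw [PySem.List.pyGetD_natCast]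
        have ht1 : (i + 1).toNat = i.toNat + 1 := by omega
        have ht2 : (i + d).toNat = i.toNat + 1 + (d - 1).toNat := by omega
        have hval : (Dlist duration cost n n).getD i.toNat 0
            = max r1.1 (r2.1 + PySem.List.pyGetD cost i 0) := by
          rw [hLrec, if_pos (by omega), h1.1, h2.1, ht1, ht2, hcget]
        obtain ⟨hg2N, hg2All⟩ := h2.2
        refine ⟨hval.symm, ?_, ?_⟩
        · show (r2.2.insert i _).get? (n : Int) = some 0
          rw [PySem.Dict.get?_insert, if_neg (fun h => hine h.symm)]
          exact hg2N
        · intro j v hjv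
          replace hjv : (r2.2.insert i _).get? j = some v := hjv
          rw [PySem.Dict.get?_insert] at hjv
          by_cases hji : j = i
          · rw [if_pos hji] at hjv
            refine ⟨hji ▸ h0, hji ▸ le_of_lt hilt, ?_⟩
            rw [hji, hval]
            injection hjv with hjv
            rw [← hjv]
          · rw [if_neg hji] at hjv
            exact hg2All j v hjv

-- the driving loop: folding f over any list of in-range indices
lemma drive (duration cost : List Int) (n : Nat)
    (hpos : ∀ j, j < n → 1 ≤ duration.getD j 0) :
    ∀ (is : List Int) (memo : PySem.Dict Int Int) (best : Int),
      GoodMemo duration cost n memo → (∀ i ∈ is, 0 ≤ i ∧ i ≤ (n : Int)) →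
      (is.foldl (fun (st : PySem.Dict Int Int × Int) i =>
          let r := solutionF (n : Int) duration cost (n + 2) i st.1
          (r.2, max st.2 r.1)) (memo, best)).2
        = is.foldl (fun b i => max b ((Dlist duration cost n n).getD i.toNat 0)) best := by
  intro is
  induction is with
  | nil => intro memo best _ _; rfl
  | cons i t ih =>
    intro memo best hgood hall
    have hi := hall i (List.mem_cons_self)
    have hf := f_correct duration cost n hpos (n + 2) i memo hgood hi.1 hi.2 (by omega)
    simp only [List.foldl_cons]
    rw [hf.1] at *
    exact (by
      have := ih (solutionF (n : Int) duration cost (n + 2) i memo).2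
        (max best ((Dlist duration cost n n).getD i.toNat 0)) hf.2
        (fun x hx => hall x (List.mem_cons_of_mem i hx))
      simpa [hf.1] using this)

theorem solution_eq (N : Int) (duration cost : List Int) (hp : Pre_solution N duration cost) :
    solution N duration cost = solution_alt N duration cost := by
  obtain ⟨hN0, hdl, hcl, hposm⟩ := hp
  set n := N.toNat with hn
  have hNn : N = (n : Int) := by omega
  have hpos : ∀ j, j < n → 1 ≤ duration.getD j 0 := by
    intro j hj
    have hj' : j < duration.length := by omega
    rw [List.getD_eq_getElem _ _ hj']
    have ht : (duration.take n)[j]'(by simp; omega) = duration[j] := List.getElem_take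
    have hm := List.all_eq_true.mp hposm _ (ht ▸ List.getElem_mem _)
    exact of_decide_eq_true hm
  set L := Dlist duration cost n n with hL
  have hlen : L.length = n + 1 := Dlist_length duration cost n n
  -- A's side: max over the table
  have hA : solution N duration cost = (PySem.List.max? (Afold duration cost n n) (fun x => x)).getD 0 := by
    unfold solution Afold
    rw [hNn, PySem.List.pyRange_neg_one,
        show ((n : Int) - 1 - (-1)).toNat = n by omega,
        show ((n : Int) + 1).toNat = n + 1 by omega,
        List.foldl_map]
  have hAfold : Afold duration cost n n = L := by
    rw [inv_A duration cost n hpos n (le_refl n)]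
    simp only [Nat.sub_self, List.replicate_zero, List.nil_append]
    exact hL.symm
  have hAval : solution N duration cost = L.foldl max 0 := by
    rw [hA, hAfold,
        maxD_eq_foldl L (by intro h; rw [h] at hlen; simp at hlen) (Dlist_mem_zero duration cost n n)]
  -- B's side: the driving fold
  have hmemo0 : GoodMemo duration cost n ((PySem.Dict.empty : PySem.Dict Int Int).insert (n : Int) 0) := by
    constructor
    · exact PySem.Dict.get?_insert_self _ _ _
    · intro j v hjv
      rw [PySem.Dict.get?_insert] at hjv
      by_cases hji : j = (n : Int)
      · rw [if_pos hji] at hjv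
        injection hjv with hjv
        subst hji
        refine ⟨Int.natCast_nonneg n, le_refl _, ?_⟩
        rw [← hjv, Int.toNat_natCast]
        exact (L_last duration cost n).symm
      · rw [if_neg hji] at hjv
        rw [PySem.Dict.get?_empty] at hjv
        simp at hjv
  have hB : solution_alt N duration cost
      = (PySem.List.pyRange (n : Int) (-1) (-1)).foldl
          (fun b i => max b (L.getD i.toNat 0)) 0 := by
    unfold solution_alt
    rw [hNn, show (((n : Int)) + 2).toNat = n + 2 by omega]
    exact drive duration cost n hpos _ _ 0 hmemo0
      (fun i hi => by
        rw [PySem.List.mem_pyRange_neg_one] at hi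
        omega)
  -- evaluate B's fold: it is max over L reversed
  have hmap : (List.range (n + 1)).map (fun k => L.getD (n - k) 0) = L.reverse := by
    apply List.ext_getElem
    · simp [hlen]
    · intro k h1 h2
      simp only [List.getElem_map, List.getElem_range]
      have hk : k < n + 1 := by simpa using h1
      rw [List.getElem_reverse]
      rw [List.getD_eq_getElem _ _ (by omega : n - k < L.length)]
      congr 1
      omega
  have hBval : solution_alt N duration cost = L.foldl max 0 := by
    rw [hB, PySem.List.pyRange_neg_one,
        show ((n : Int) - (-1)).toNat = n + 1 by omega, List.foldl_map]
    have hcong : List.foldl (fun (x : Int) (y : Nat) => max x (L.getD ((n : Int) - (y : Int)).toNat 0)) 0 (List.range (n + 1))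
        = List.foldl (fun (x : Int) (y : Nat) => max x (L.getD (n - y) 0)) 0 (List.range (n + 1)) := by
      apply PySem.List.foldl_congr_mem
      intro acc x hx
      rw [List.mem_range] at hx
      have hxx : ((n : Int) - (x : Int)).toNat = n - x := by omega
      rw [hxx]
    rw [hcong, ← List.foldl_map, hmap, foldl_max_reverse]
  rw [hAval, hBval]

-- ===== VERDICT (by name: the statement is the Claim_ definition above) =====
theorem solution_spec : Claim_equal_solution := by
  intro N duration cost _ hp
  unfold Spec_solution
  exact solution_eq N duration cost hp
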